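-- pv_equiv track=rewrite | github.com/mace141/Notes | Data Structures & Algorithms/structy.py | tolerant_teams
-- ===== SOURCE A (Python) =====
-- def tolerant_teams(rivalries):
--   graph = build_graph(rivalries)
--
--   tolerance = {}
--   for node in graph:
--     if node not in tolerance:
--       if not tolerable(graph, node, tolerance, True):
--         return False
--
--   return True
--
-- def tolerable(graph, node, tolerance, team):
--   if node in tolerance:
--     return tolerance[node] == team
--
--   tolerance[node] = team
--   for neighbor in graph[node]:
--     if not tolerable(graph, neighbor, tolerance, not team):
--       return False
--
--   return True
--
-- def build_graph(edges):
--   graph = {}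
--
--   for num_1, num_2 in edges:
--     if num_1 not in graph:
--       graph[num_1] = []
--     if num_2 not in graph:
--       graph[num_2] = []
--     graph[num_1].append(num_2)
--
--   return graph
-- ===== SOURCE B (Python) =====
-- def tolerant_teams(rivalries):
--   graph = build_graph(rivalries)
--
--   tolerance = {}
--   for node in graph:
--     if node not in tolerance:
--       stack = [(node, True)]
--       while stack:
--         n, team = stack.pop()
--         if n in tolerance:
--           if tolerance[n] != team:
--             return False
--         else:
--           tolerance[n] = team
--           for neighbor in reversed(graph[n]):
--             stack.append((neighbor, not team))
--
--   return True
--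
-- def build_graph(edges):
--   graph = {}
--
--   for num_1, num_2 in edges:
--     if num_1 not in graph:
--       graph[num_1] = []
--     if num_2 not in graph:
--       graph[num_2] = []
--     graph[num_1].append(num_2)
--
--   return graph
-- ===== Notes on version B (the rewrite author's own statement) =====
-- stated objective: alternative
-- what changed: The recursive depth-first two-coloring helper 'tolerable' is replaced by an explicit iterative worklist: a stack of (node, expected-team) pairs popped in a loop, coloring on first visit and checking the color otherwise; build_graph is unchanged.
import Mathlib
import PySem

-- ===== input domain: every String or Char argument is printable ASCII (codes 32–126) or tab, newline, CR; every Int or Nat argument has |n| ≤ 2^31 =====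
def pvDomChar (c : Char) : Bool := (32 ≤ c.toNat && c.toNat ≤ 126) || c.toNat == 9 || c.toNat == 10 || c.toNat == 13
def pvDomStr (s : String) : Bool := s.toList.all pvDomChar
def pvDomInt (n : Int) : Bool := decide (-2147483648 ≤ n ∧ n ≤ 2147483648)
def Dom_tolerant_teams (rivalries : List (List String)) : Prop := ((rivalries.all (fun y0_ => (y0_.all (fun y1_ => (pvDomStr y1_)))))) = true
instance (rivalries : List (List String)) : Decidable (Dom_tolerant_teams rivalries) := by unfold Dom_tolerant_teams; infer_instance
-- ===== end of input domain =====

-- B replaces A's recursive two-coloring (`tolerable`) by an explicit worklist: a stack of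
-- (node, expected team) pairs popped in a loop; same build_graph, same return value (alternative
-- decomposition, no speed claim). Recursion in the ports is made total by a fuel argument that is
-- provably sufficient (pvNu/pvPhi measure the uncolored part of the graph).

-- loop body of build_graph (shared by both Pythons)
def bgStep (g : PySem.Dict String (List String)) (e : List String) : PySem.Dict String (List String) :=
  match e with
  | [a, b] =>
    let g1 := if g.contains a then g else g.insert a []
    let g2 := if g1.contains b then g1 else g1.insert b []
    g2.modify a [] (fun l => l ++ [b])
  | _ => g   -- unreachable under Pre_ (Python unpacking raises ValueError here)

def buildGraph (edges : List (List String)) : PySem.Dict String (List String) :=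
  edges.foldl bgStep PySem.Dict.empty

-- fuel measure: total size (1 + adjacency length) of the not-yet-colored keys; the recursion of
-- `tolerable` and the worklist loop both consume it, so this fuel is sufficient (proved below)
def pvNu (g : PySem.Dict String (List String)) (t : PySem.Dict String Bool) : Nat :=
  ((g.keys.filter (fun k => !(t.contains k))).map (fun k => (g.getD k []).length + 1)).sum

-- ===== PORT A =====
mutual
-- tolerable(graph, node, tolerance, team): returns (bool, updated tolerance)
def tolA (g : PySem.Dict String (List String)) :
    Nat → String → PySem.Dict String Bool → Bool → Bool × PySem.Dict String Bool
  | 0, _, t, _ => (false, t)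
  | f+1, n, t, team =>
    if t.contains n then (t.getD n true == team, t)
    else foldA g f (g.getD n []) (t.insert n team) (!team)
-- the `for neighbor in graph[node]` loop of tolerable
def foldA (g : PySem.Dict String (List String)) :
    Nat → List String → PySem.Dict String Bool → Bool → Bool × PySem.Dict String Bool
  | _, [], t, _ => (true, t)
  | 0, _ :: _, t, _ => (false, t)
  | f+1, x :: xs, t, team =>
    let r := tolA g f x t team
    if r.1 then foldA g f xs r.2 team else (false, r.2)
end

def tolTop (g : PySem.Dict String (List String)) (n : String) (t : PySem.Dict String Bool) (team : Bool) :
    Bool × PySem.Dict String Bool :=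
  tolA g (pvNu g t + 1) n t team

-- the `for node in graph` loop of tolerant_teams
def outerA (g : PySem.Dict String (List String)) : List String → PySem.Dict String Bool → Bool
  | [], _ => true
  | n :: ns, t =>
    if t.contains n then outerA g ns t
    else
      let r := tolTop g n t true
      if r.1 then outerA g ns r.2 else false

def tolerant_teams (rivalries : List (List String)) : Bool :=
  let graph := buildGraph rivalries
  outerA graph graph.keys PySem.Dict.empty

-- ===== PORT B =====
def pvPhi (g : PySem.Dict String (List String)) (st : List (String × Bool)) (t : PySem.Dict String Bool) : Nat :=
  st.length + pvNu g t

-- the `while stack` loop of B: pop (n, team); check color or color-and-push-neighbors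
def runB (g : PySem.Dict String (List String)) :
    Nat → List (String × Bool) → PySem.Dict String Bool → Bool × PySem.Dict String Bool
  | 0, _, t => (false, t)
  | _+1, [], t => (true, t)
  | f+1, (n, team) :: st, t =>
    if t.contains n then
      if t.getD n true == team then runB g f st t else (false, t)
    else runB g f ((g.getD n []).map (fun nb => (nb, !team)) ++ st) (t.insert n team)

def runTop (g : PySem.Dict String (List String)) (st : List (String × Bool)) (t : PySem.Dict String Bool) :
    Bool × PySem.Dict String Bool :=
  runB g (pvPhi g st t + 1) st t

-- the `for node in graph` loop of B
def outerB (g : PySem.Dict String (List String)) : List String → PySem.Dict String Bool → Bool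
  | [], _ => true
  | n :: ns, t =>
    if t.contains n then outerB g ns t
    else
      let r := runTop g [(n, true)] t
      if r.1 then outerB g ns r.2 else false

def tolerant_teams_alt (rivalries : List (List String)) : Bool :=
  let graph := buildGraph rivalries
  outerB graph graph.keys PySem.Dict.empty

-- ===== PRECONDITION & SPEC =====
-- Pre_ excludes only inputs where both Pythons raise ValueError: an edge list entry that is not a pair.
def Pre_tolerant_teams (rivalries : List (List String)) : Prop :=
  ∀ e ∈ rivalries, e.length = 2
instance (rivalries : List (List String)) : Decidable (Pre_tolerant_teams rivalries) := by
  unfold Pre_tolerant_teams; infer_instance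

def pvWitness_tolerant_teams : List (List String) := [["a", "b"], ["b", "c"], ["a", "c"]]

def Spec_tolerant_teams (rivalries : List (List String)) (out : Bool) : Prop := out = tolerant_teams_alt rivalries
instance (rivalries : List (List String)) (out : Bool) : Decidable (Spec_tolerant_teams rivalries out) := by unfold Spec_tolerant_teams; infer_instance

-- ===== CLAIM (what is proved, stated in full; the proofs are below) =====
def Claim_equal_tolerant_teams : Prop := ∀ (rivalries : List (List String)), Dom_tolerant_teams rivalries → Pre_tolerant_teams rivalries → Spec_tolerant_teams rivalries (tolerant_teams rivalries)

-- ===== LEMMAS AND PROOFS =====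

-- the sequential reference: process a worklist by running A's `tolerable` on each item in turn
def FoldS (g : PySem.Dict String (List String)) :
    List (String × Bool) → PySem.Dict String Bool → Bool × PySem.Dict String Bool
  | [], t => (true, t)
  | (n, tm) :: st, t =>
    let r := tolTop g n t tm
    if r.1 then FoldS g st r.2 else (false, r.2)

lemma pvNu_mono (g : PySem.Dict String (List String)) {t t' : PySem.Dict String Bool}
    (h : ∀ k, t.contains k = true → t'.contains k = true) : pvNu g t' ≤ pvNu g t := by
  unfold pvNu
  refine List.Sublist.sum_le_sum (List.Sublist.map _ ?_) (fun a _ => Nat.zero_le a)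
  refine List.monotone_filter_right _ ?_
  intro a ha
  cases hc : t.contains a with
  | false => simp
  | true => simp [h a hc] at ha

lemma mono_tolA (g : PySem.Dict String (List String)) : ∀ f : Nat,
    (∀ n t team k, t.contains k = true → (tolA g f n t team).2.contains k = true) ∧
    (∀ l t team k, t.contains k = true → (foldA g f l t team).2.contains k = true) := by
  intro f
  induction f with
  | zero =>
    constructor
    · intro n t team k hk; simpa [tolA] using hk
    · intro l t team k hk; cases l <;> simpa [foldA] using hk
  | succ f ih =>
    constructor
    · intro n t team k hk
      cases hc : t.contains n with
      | true => simpa [tolA, hc] using hk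
      | false =>
        simp only [tolA, hc, Bool.false_eq_true, if_false]
        exact ih.2 _ _ _ k (by simp [PySem.Dict.contains_insert, hk])
    · intro l t team k hk
      cases l with
      | nil => simpa [foldA] using hk
      | cons x xs =>
        simp only [foldA]
        have hr : (tolA g f x t team).2.contains k = true := ih.1 x t team k hk
        cases hb : (tolA g f x t team).1 with
        | true => simp only [if_true]; exact ih.2 _ _ _ k hr
        | false => simpa [hb] using hr

lemma filter_insert_weight (t : PySem.Dict String Bool) (n : String) (v : Bool) (w : String → Nat) :
    ∀ L : List String, L.Nodup → n ∈ L → t.contains n = false →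
      ((L.filter (fun k => !((t.insert n v).contains k))).map w).sum + w n
        = ((L.filter (fun k => !(t.contains k))).map w).sum := by
  intro L
  induction L with
  | nil => simp
  | cons a L ih =>
    intro hnd hmem hc
    by_cases ha : a = n
    · subst ha
      have hnotmem : a ∉ L := (List.nodup_cons.mp hnd).1
      have hfeq : L.filter (fun k => !((t.insert a v).contains k)) = L.filter (fun k => !(t.contains k)) := by
        refine List.filter_congr ?_
        intro k hk
        have hkn : k ≠ a := fun h => hnotmem (h ▸ hk)
        simp [PySem.Dict.contains_insert, hkn]
      have hpa' : (!((t.insert a v).contains a)) = false := by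
        simp
      have hpa : (!(t.contains a)) = true := by simp [hc]
      simp only [List.filter_cons, hpa', hpa, Bool.false_eq_true, if_false, if_true]
      rw [hfeq]
      simp only [List.map_cons, List.sum_cons]
      omega
    · have hmem' : n ∈ L := by
        cases hmem with
        | head => exact absurd rfl ha
        | tail _ h => exact h
      have hstep := ih (List.nodup_cons.mp hnd).2 hmem' hc
      have hsame : ((t.insert n v).contains a) = t.contains a := by
        simp [PySem.Dict.contains_insert, ha]
      cases hca : t.contains a with
      | true => simp [hsame, hca, hstep]
      | false =>
        simp only [List.filter_cons, hsame, hca]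
        simp only [Bool.not_false, if_true, List.map_cons, List.sum_cons]
        omega

lemma pvNu_insert_key (g : PySem.Dict String (List String)) (hnd : g.keys.Nodup)
    {n : String} {t : PySem.Dict String Bool} (hmem : n ∈ g.keys) (hc : t.contains n = false) (v : Bool) :
    pvNu g (t.insert n v) + ((g.getD n []).length + 1) = pvNu g t :=
  filter_insert_weight t n v (fun k => (g.getD k []).length + 1) g.keys hnd hmem hc

lemma pvNu_insert_not_key (g : PySem.Dict String (List String))
    {n : String} (hmem : n ∉ g.keys) (t : PySem.Dict String Bool) (v : Bool) :
    pvNu g (t.insert n v) = pvNu g t := by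
  unfold pvNu
  congr 2
  refine List.filter_congr ?_
  intro k hk
  have hkn : k ≠ n := fun h => hmem (h ▸ hk)
  simp [PySem.Dict.contains_insert, hkn]

lemma getD_not_key (g : PySem.Dict String (List String)) {n : String} (hmem : n ∉ g.keys) :
    g.getD n [] = [] := by
  refine PySem.Dict.getD_of_not_contains g [] ?_
  cases hc : g.contains n with
  | false => rfl
  | true => exact absurd ((PySem.Dict.contains_iff_mem_keys g n).mp hc) hmem

lemma stab (g : PySem.Dict String (List String)) (hnd : g.keys.Nodup) : ∀ f : Nat,
    (∀ n t team, pvNu g t < f → tolA g (f+1) n t team = tolA g f n t team) ∧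
    (∀ l t team, l.length + pvNu g t < f → foldA g (f+1) l t team = foldA g f l t team) := by
  intro f
  induction f with
  | zero => exact ⟨fun n t team h => absurd h (by omega), fun l t team h => absurd h (by omega)⟩
  | succ f ih =>
    constructor
    · intro n t team hlt
      cases hc : t.contains n with
      | true => simp [tolA, hc]
      | false =>
        simp only [tolA, hc, Bool.false_eq_true, if_false]
        by_cases hmem : n ∈ g.keys
        · refine ih.2 _ _ _ ?_
          have := pvNu_insert_key g hnd hmem hc team
          omega
        · rw [getD_not_key g hmem]
          simp [foldA]
    · intro l t team hlt
      cases l with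
      | nil => simp [foldA]
      | cons x xs =>
        have h1 : tolA g (f+1) x t team = tolA g f x t team := ih.1 x t team (by simp at hlt; omega)
        simp only [foldA, h1]
        cases hb : (tolA g f x t team).1 with
        | false => simp
        | true =>
          simp only [if_true]
          refine ih.2 _ _ _ ?_
          have hmono : pvNu g (tolA g f x t team).2 ≤ pvNu g t :=
            pvNu_mono g (fun k hk => (mono_tolA g f).1 x t team k hk)
          simp at hlt
          omega

lemma tolA_ge (g : PySem.Dict String (List String)) (hnd : g.keys.Nodup)
    {t : PySem.Dict String Bool} : ∀ f : Nat, pvNu g t + 1 ≤ f →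
    ∀ n team, tolA g f n t team = tolTop g n t team := by
  intro f
  induction f with
  | zero => intro h; omega
  | succ f ih =>
    intro hf n team
    by_cases h : f = pvNu g t
    · subst h; rfl
    · rw [(stab g hnd f).1 n t team (by omega)]
      exact ih (by omega) n team

lemma FoldS_append (g : PySem.Dict String (List String)) :
    ∀ (xs ys : List (String × Bool)) (t : PySem.Dict String Bool),
      FoldS g (xs ++ ys) t = (let r := FoldS g xs t; if r.1 then FoldS g ys r.2 else (false, r.2)) := by
  intro xs
  induction xs with
  | nil => intro ys t; simp [FoldS]
  | cons p xs ih =>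
    intro ys t
    obtain ⟨n, tm⟩ := p
    simp only [List.cons_append, FoldS]
    cases hb : (tolTop g n t tm).1 with
    | true => simp only [if_true]; exact ih ys _
    | false => simp

lemma foldA_eq_FoldS (g : PySem.Dict String (List String)) (hnd : g.keys.Nodup) :
    ∀ (l : List String) (t : PySem.Dict String Bool) (tm : Bool) (f : Nat),
      l.length + pvNu g t < f →
      foldA g f l t tm = FoldS g (l.map (fun nb => (nb, tm))) t := by
  intro l
  induction l with
  | nil => intro t tm f _; cases f <;> simp [foldA, FoldS]
  | cons x xs ih =>
    intro t tm f hf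
    obtain ⟨f', rfl⟩ : ∃ f', f = f' + 1 := ⟨f - 1, by omega⟩
    have hx : tolA g f' x t tm = tolTop g x t tm :=
      tolA_ge g hnd f' (by simp at hf; omega) x tm
    simp only [foldA, List.map_cons, FoldS, hx]
    cases hb : (tolTop g x t tm).1 with
    | false => simp
    | true =>
      simp only [if_true]
      refine ih _ tm f' ?_
      have hmono : pvNu g (tolTop g x t tm).2 ≤ pvNu g t :=
        pvNu_mono g (fun k hk => (mono_tolA g (pvNu g t + 1)).1 x t tm k hk)
      simp at hf
      omega

lemma tolTop_unfold (g : PySem.Dict String (List String)) (hnd : g.keys.Nodup)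
    (n : String) (t : PySem.Dict String Bool) (tm : Bool) :
    tolTop g n t tm = if t.contains n then (t.getD n true == tm, t)
      else FoldS g ((g.getD n []).map (fun nb => (nb, !tm))) (t.insert n tm) := by
  cases hc : t.contains n with
  | true => simp [tolTop, tolA, hc]
  | false =>
    show tolA g (pvNu g t + 1) n t tm = _
    simp only [tolA, hc, Bool.false_eq_true, if_false]
    by_cases hmem : n ∈ g.keys
    · refine foldA_eq_FoldS g hnd _ _ _ _ ?_
      have := pvNu_insert_key g hnd hmem hc tm
      omega
    · rw [getD_not_key g hmem]
      simp [foldA, FoldS]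

lemma stabB (g : PySem.Dict String (List String)) (hnd : g.keys.Nodup) : ∀ f : Nat,
    ∀ st t, pvPhi g st t < f → runB g (f+1) st t = runB g f st t := by
  intro f
  induction f with
  | zero => intro st t h; exact absurd h (by omega)
  | succ f ih =>
    intro st t hlt
    cases st with
    | nil => simp [runB]
    | cons p st =>
      obtain ⟨n, tm⟩ := p
      simp only [runB]
      cases hc : t.contains n with
      | false =>
        simp only [Bool.false_eq_true, if_false]
        refine ih _ _ ?_
        unfold pvPhi at hlt ⊢
        simp only [List.length_append, List.length_map, List.length_cons] at hlt ⊢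
        by_cases hmem : n ∈ g.keys
        · have := pvNu_insert_key g hnd hmem hc tm; omega
        · rw [getD_not_key g hmem, pvNu_insert_not_key g hmem t tm]
          simp; omega
      | true =>
        simp only [if_true]
        cases hb : (t.getD n true == tm) with
        | false => simp
        | true =>
          simp only [if_true]
          refine ih _ _ ?_
          unfold pvPhi at hlt ⊢
          simp at hlt
          omega

lemma runB_ge (g : PySem.Dict String (List String)) (hnd : g.keys.Nodup)
    {st : List (String × Bool)} {t : PySem.Dict String Bool} : ∀ f : Nat, pvPhi g st t + 1 ≤ f →
    runB g f st t = runTop g st t := by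
  intro f
  induction f with
  | zero => intro h; omega
  | succ f ih =>
    intro hf
    by_cases h : f = pvPhi g st t
    · subst h; rfl
    · rw [stabB g hnd f st t (by omega)]
      exact ih (by omega)

lemma run_eq_fold (g : PySem.Dict String (List String)) (hnd : g.keys.Nodup) :
    ∀ (m : Nat) (st : List (String × Bool)) (t : PySem.Dict String Bool),
      pvPhi g st t ≤ m → runTop g st t = FoldS g st t := by
  intro m
  induction m with
  | zero =>
    intro st t h
    cases st with
    | nil => simp [runTop, runB, FoldS]
    | cons p st => exact absurd h (by unfold pvPhi; simp)
  | succ m ih =>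
    intro st t hle
    cases st with
    | nil => simp [runTop, runB, FoldS]
    | cons p st =>
      obtain ⟨n, tm⟩ := p
      show runB g (pvPhi g ((n, tm) :: st) t + 1) ((n, tm) :: st) t = _
      simp only [runB]
      conv_rhs => rw [show FoldS g ((n, tm) :: st) t =
        (let r := tolTop g n t tm; if r.1 then FoldS g st r.2 else (false, r.2)) from rfl]
      rw [tolTop_unfold g hnd]
      cases hc : t.contains n with
      | true =>
        simp only [if_true]
        cases hb : (t.getD n true == tm) with
        | false => simp
        | true =>
          simp only [if_true]
          have h1 : runB g (pvPhi g ((n, tm) :: st) t) st t = runTop g st t := by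
            refine runB_ge g hnd _ ?_
            unfold pvPhi; simp
          rw [h1]
          refine ih st t ?_
          unfold pvPhi at hle ⊢; simp at hle; omega
      | false =>
        simp only [Bool.false_eq_true, if_false]
        have hbound : pvPhi g ((g.getD n []).map (fun nb => (nb, !tm)) ++ st) (t.insert n tm) + 1
            ≤ pvPhi g ((n, tm) :: st) t := by
          unfold pvPhi
          simp only [List.length_append, List.length_map, List.length_cons]
          by_cases hmem : n ∈ g.keys
          · have := pvNu_insert_key g hnd hmem hc tm; omega
          · rw [getD_not_key g hmem, pvNu_insert_not_key g hmem t tm]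
            simp
        rw [runB_ge g hnd _ hbound]
        rw [ih _ _ (by omega)]
        rw [FoldS_append]

lemma outer_eq (g : PySem.Dict String (List String)) (hnd : g.keys.Nodup) :
    ∀ (ns : List String) (t : PySem.Dict String Bool), outerA g ns t = outerB g ns t := by
  intro ns
  induction ns with
  | nil => intro t; rfl
  | cons n ns ih =>
    intro t
    simp only [outerA, outerB]
    cases hc : t.contains n with
    | true => simp [ih]
    | false =>
      simp only [Bool.false_eq_true, if_false]
      have hrun : runTop g [(n, true)] t = FoldS g [(n, true)] t :=
        run_eq_fold g hnd (pvPhi g [(n, true)] t) _ _ le_rfl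
      rw [hrun]
      show (let r := tolTop g n t true; if r.1 then outerA g ns r.2 else false) = _
      simp only [FoldS]
      cases hb : (tolTop g n t true).1 with
      | true => simp only [if_true]; exact ih _
      | false => simp

lemma buildGraph_nodup (rivalries : List (List String)) : (buildGraph rivalries).keys.Nodup := by
  unfold buildGraph
  suffices h : ∀ (es : List (List String)) (d : PySem.Dict String (List String)),
      d.keys.Nodup → (es.foldl bgStep d).keys.Nodup from
    h rivalries PySem.Dict.empty PySem.Dict.nodup_keys_empty
  intro es
  induction es with
  | nil => intro d h; exact h
  | cons e es ih =>
    intro d h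
    refine ih _ ?_
    rcases e with _ | ⟨a, _ | ⟨b, _ | _⟩⟩ <;> try exact h
    -- e = [a, b]
    simp only [bgStep]
    have h1 : (if d.contains a then d else d.insert a []).keys.Nodup := by
      split
      · exact h
      · exact PySem.Dict.nodup_keys_insert _ _ _ h
    have h2 : (if (if d.contains a then d else d.insert a []).contains b
        then (if d.contains a then d else d.insert a [])
        else (if d.contains a then d else d.insert a []).insert b []).keys.Nodup := by
      cases hcb : (if d.contains a then d else d.insert a []).contains b with
      | true => simpa [hcb] using h1
      | false => simp only [Bool.false_eq_true, if_false]; exact PySem.Dict.nodup_keys_insert _ _ _ h1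
    rw [PySem.Dict.keys_modify]
    exact PySem.Dict.nodup_keys_insert _ _ _ h2

-- ===== VERDICT (by name: the statement is the Claim_ definition above) =====
theorem tolerant_teams_spec : Claim_equal_tolerant_teams := by
  intro rivalries _ _
  unfold Spec_tolerant_teams tolerant_teams tolerant_teams_alt
  exact outer_eq _ (buildGraph_nodup rivalries) _ _
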